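-- pv_equiv track=rewrite | github.com/Jen1us/uPimulator | golang/uPIMulator/tools/generate_chiplet_model.py | build_chunk_plan
-- ===== SOURCE A (Python) =====
-- from typing import Any, Dict, List, Optional, Sequence
--
-- def build_chunk_plan(tokens: int, hidden_size: int, dtype_bytes: int, chunk_bytes: int) -> List[int]:
--     if tokens <= 0:
--         return []
--     per_token_bytes = max(hidden_size * dtype_bytes, dtype_bytes)
--     if per_token_bytes <= 0:
--         per_token_bytes = dtype_bytes
--     tokens_per_chunk = max(chunk_bytes // per_token_bytes, 1)
--     plan: List[int] = []
--     remaining = tokens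
--     while remaining > 0:
--         take = min(tokens_per_chunk, remaining)
--         plan.append(take)
--         remaining -= take
--     if not plan:
--         plan.append(tokens)
--     return plan
-- ===== SOURCE B (Python) =====
-- def build_chunk_plan(tokens: int, hidden_size: int, dtype_bytes: int, chunk_bytes: int):
--     if tokens <= 0:
--         return []
--     per_token_bytes = max(hidden_size * dtype_bytes, dtype_bytes)
--     if per_token_bytes <= 0:
--         per_token_bytes = dtype_bytes
--     q = max(chunk_bytes // per_token_bytes, 1)
--     n, r = divmod(tokens, q)
--     return [q] * n + ([r] if r else [])
-- ===== Notes on version B (the rewrite author's own statement) =====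
-- stated objective: simpler
-- what changed: Replaces the decrementing while-loop accumulation with a closed-form divmod: n full chunks of size q plus an optional remainder element.
import Mathlib
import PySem

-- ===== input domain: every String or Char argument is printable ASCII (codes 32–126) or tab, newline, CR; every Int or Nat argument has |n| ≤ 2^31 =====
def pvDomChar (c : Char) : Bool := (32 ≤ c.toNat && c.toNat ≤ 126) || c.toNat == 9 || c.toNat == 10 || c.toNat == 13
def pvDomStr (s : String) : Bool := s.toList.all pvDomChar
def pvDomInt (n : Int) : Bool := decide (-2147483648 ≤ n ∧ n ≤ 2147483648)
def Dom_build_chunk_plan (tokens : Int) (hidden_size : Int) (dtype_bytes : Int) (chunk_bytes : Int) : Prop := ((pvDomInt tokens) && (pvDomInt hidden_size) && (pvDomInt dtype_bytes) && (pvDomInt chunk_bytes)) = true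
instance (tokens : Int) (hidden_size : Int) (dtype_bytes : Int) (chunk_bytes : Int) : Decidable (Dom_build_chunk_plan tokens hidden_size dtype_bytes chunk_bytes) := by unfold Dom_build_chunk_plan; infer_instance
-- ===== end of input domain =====

-- B replaces the decrementing while-loop of A with a closed-form divmod construction (objective: simpler).
-- A raises ZeroDivisionError when tokens > 0 and dtype_bytes = 0; B raises there too; Pre_ excludes exactly that.

-- ===== PORT A =====
-- the while loop of A: fuel = tokens.toNat suffices since q >= 1 makes each iteration remove at least one token
def bcpLoop (q : Int) (remaining : Int) (plan : List Int) (fuel : Nat) : List Int :=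
  match fuel with
  | 0 => plan
  | Nat.succ fuel =>
    if remaining > 0 then
      bcpLoop q (remaining - min q remaining) (plan ++ [min q remaining]) fuel
    else plan

def build_chunk_plan (tokens : Int) (hidden_size : Int) (dtype_bytes : Int) (chunk_bytes : Int) : List Int :=
  if tokens <= 0 then []
  else
    let per0 := max (hidden_size * dtype_bytes) dtype_bytes
    let per_token_bytes := if per0 <= 0 then dtype_bytes else per0
    let tokens_per_chunk := max (PySem.Int.floordiv chunk_bytes per_token_bytes) 1
    let plan := bcpLoop tokens_per_chunk tokens [] tokens.toNat
    if plan = [] then plan ++ [tokens] else plan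

-- ===== PORT B =====
def build_chunk_plan_alt (tokens : Int) (hidden_size : Int) (dtype_bytes : Int) (chunk_bytes : Int) : List Int :=
  if tokens <= 0 then []
  else
    let per0 := max (hidden_size * dtype_bytes) dtype_bytes
    let per_token_bytes := if per0 <= 0 then dtype_bytes else per0
    let q := max (PySem.Int.floordiv chunk_bytes per_token_bytes) 1
    let n := PySem.Int.floordiv tokens q
    let r := PySem.Int.mod tokens q
    List.replicate n.toNat q ++ (if r ≠ 0 then [r] else [])

-- ===== PRECONDITION & SPEC =====
-- Pre_ excludes only the inputs on which A raises ZeroDivisionError: tokens > 0 with dtype_bytes = 0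
def Pre_build_chunk_plan (tokens : Int) (hidden_size : Int) (dtype_bytes : Int) (chunk_bytes : Int) : Prop :=
  tokens ≤ 0 ∨ dtype_bytes ≠ 0
instance (tokens : Int) (hidden_size : Int) (dtype_bytes : Int) (chunk_bytes : Int) : Decidable (Pre_build_chunk_plan tokens hidden_size dtype_bytes chunk_bytes) := by unfold Pre_build_chunk_plan; infer_instance

def pvWitness_build_chunk_plan : Int × Int × Int × Int := (10, 8, 2, 32)

def Spec_build_chunk_plan (tokens : Int) (hidden_size : Int) (dtype_bytes : Int) (chunk_bytes : Int) (out : List Int) : Prop := out = build_chunk_plan_alt tokens hidden_size dtype_bytes chunk_bytes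
instance (tokens : Int) (hidden_size : Int) (dtype_bytes : Int) (chunk_bytes : Int) (out : List Int) : Decidable (Spec_build_chunk_plan tokens hidden_size dtype_bytes chunk_bytes out) := by unfold Spec_build_chunk_plan; infer_instance

-- ===== CLAIM (what is proved, stated in full; the proofs are below) =====
def Claim_equal_build_chunk_plan : Prop := ∀ (tokens : Int) (hidden_size : Int) (dtype_bytes : Int) (chunk_bytes : Int), Dom_build_chunk_plan tokens hidden_size dtype_bytes chunk_bytes → Pre_build_chunk_plan tokens hidden_size dtype_bytes chunk_bytes → Spec_build_chunk_plan tokens hidden_size dtype_bytes chunk_bytes (build_chunk_plan tokens hidden_size dtype_bytes chunk_bytes)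

-- ===== LEMMAS AND PROOFS =====

-- the while loop computes the closed form: n = remaining / q full chunks of q, then the remainder if nonzero
theorem bcpLoop_closed (q : Int) (hq : 1 ≤ q) :
    ∀ (fuel : Nat) (remaining : Int) (plan : List Int),
      0 ≤ remaining → remaining.toNat ≤ fuel →
      bcpLoop q remaining plan fuel =
        plan ++ List.replicate (PySem.Int.floordiv remaining q).toNat q ++
          (if PySem.Int.mod remaining q ≠ 0 then [PySem.Int.mod remaining q] else []) := by
  intro fuel
  induction fuel with
  | zero =>
    intro remaining plan h0 hf
    have hr : remaining = 0 := by omega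
    subst hr
    simp [bcpLoop, PySem.Int.floordiv, PySem.Int.mod]
  | succ fuel ih =>
    intro remaining plan h0 hf
    rw [PySem.Int.floordiv_eq_ediv_of_pos (by omega), PySem.Int.mod_eq_emod_of_pos (by omega)]
    by_cases hpos : remaining > 0
    · simp only [bcpLoop, if_pos hpos]
      by_cases hlt : remaining < q
      · -- last partial chunk
        have hmin : min q remaining = remaining := by omega
        rw [hmin, sub_self]
        have hstop : bcpLoop q 0 (plan ++ [remaining]) fuel = plan ++ [remaining] := by
          cases fuel <;> simp [bcpLoop]
        rw [hstop]
        have hdiv : remaining / q = 0 := Int.ediv_eq_zero_of_lt h0 hlt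
        have hmod : remaining % q = remaining := Int.emod_eq_of_lt h0 hlt
        simp [hdiv, hmod]
        omega
      · -- full chunk of size q
        have hmin : min q remaining = q := by omega
        rw [hmin]
        have h0' : 0 ≤ remaining - q := by omega
        have hf' : (remaining - q).toNat ≤ fuel := by omega
        rw [ih (remaining - q) (plan ++ [q]) h0' hf']
        rw [PySem.Int.floordiv_eq_ediv_of_pos (by omega), PySem.Int.mod_eq_emod_of_pos (by omega)]
        have hdiv : (remaining - q) / q = remaining / q - 1 := by
          have h := Int.add_mul_ediv_right remaining (-1) (by omega : q ≠ 0)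
          have heq : remaining + -1 * q = remaining - q := by ring
          rw [heq] at h; omega
        have hmod : (remaining - q) % q = remaining % q := by
          conv_lhs => rw [show remaining - q = remaining - 1 * q by ring]
          exact Int.sub_mul_emod_self_right remaining 1 q
        have hd1 : 1 ≤ remaining / q := Int.le_ediv_iff_mul_le (by omega) |>.mpr (by omega)
        have hrep : (remaining / q).toNat = ((remaining - q) / q).toNat + 1 := by omega
        rw [hdiv, hmod, hrep, List.replicate_succ]
        simp
        omega
    · have hr : remaining = 0 := by omega
      subst hr
      simp [bcpLoop]

-- ===== VERDICT (by name: the statement is the Claim_ definition above) =====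
theorem build_chunk_plan_spec : Claim_equal_build_chunk_plan := by
  intro tokens hidden_size dtype_bytes chunk_bytes _ _
  unfold Spec_build_chunk_plan build_chunk_plan build_chunk_plan_alt
  by_cases ht : tokens ≤ 0
  · simp [ht]
  · simp only [if_neg ht]
    set per0 := max (hidden_size * dtype_bytes) dtype_bytes with hper0
    set per := if per0 ≤ 0 then dtype_bytes else per0 with hper
    set q := max (PySem.Int.floordiv chunk_bytes per) 1 with hqdef
    have hq : (1:Int) ≤ q := le_max_right _ _
    have h0 : (0:Int) ≤ tokens := by omega
    rw [bcpLoop_closed q hq tokens.toNat tokens [] h0 (le_refl _)]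
    simp only [List.nil_append]
    have hqpos : (0:Int) < q := by omega
    rw [PySem.Int.floordiv_eq_ediv_of_pos hqpos, PySem.Int.mod_eq_emod_of_pos hqpos]
    have hne : List.replicate (tokens / q).toNat q ++
        (if tokens % q ≠ 0 then [tokens % q] else []) ≠ [] := by
      intro hcontra
      rcases List.append_eq_nil_iff.mp hcontra with ⟨h1, h2⟩
      have hrep : (tokens / q).toNat = 0 := by
        simpa using congrArg List.length h1
      have hmods : tokens % q = 0 := by
        by_contra hm; simp [hm] at h2
      have hdiv0 : tokens / q = 0 := by
        have hnn : 0 ≤ tokens / q := Int.ediv_nonneg h0 (by omega)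
        omega
      have hde := Int.ediv_add_emod tokens q
      rw [hdiv0, mul_zero, hmods] at hde
      omega
    rw [if_neg hne]
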